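-- pv_equiv track=rewrite | github.com/omaks45/financial_ml_project | finance-ml/data/data_processor.py | _standardize_field_name
-- ===== SOURCE A (Python) =====
-- def _standardize_field_name(field_name: str) -> str:
--     """Standardize field names"""
--     if not field_name:
--         return 'unknown_field'
--
--     # Convert to lowercase and replace spaces/special chars with underscores
--     standardized = str(field_name).lower().replace(' ', '_').replace('-', '_')
--
--     # Remove special characters
--     standardized = ''.join(c for c in standardized if c.isalnum() or c == '_')
--
--     # Remove multiple underscores
--     while '__' in standardized:
--         standardized = standardized.replace('__', '_')
--
--     # Remove leading/trailing underscores
--     standardized = standardized.strip('_')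
--
--     return standardized or 'unknown_field'
-- ===== SOURCE B (Python) =====
-- def _standardize_field_name(field_name: str) -> str:
--     """Standardize field names (single stateful pass instead of A's multi-pass pipeline)."""
--     if not field_name:
--         return 'unknown_field'
--     out = []
--     for c in str(field_name).lower():
--         if c in ' -_':
--             if out and out[-1] != '_':
--                 out.append('_')
--         elif c.isalnum():
--             out.append(c)
--     return ''.join(out).rstrip('_') or 'unknown_field'
-- ===== Notes on version B (the rewrite author's own statement) =====
-- stated objective: simpler
-- what changed: Replaces A's multi-pass pipeline (two replaces, a filter, a fixpoint while-loop collapsing '__', and strip) by one stateful scan that emits characters while suppressing leading/duplicate underscores, followed by a single rstrip.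
import Mathlib
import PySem

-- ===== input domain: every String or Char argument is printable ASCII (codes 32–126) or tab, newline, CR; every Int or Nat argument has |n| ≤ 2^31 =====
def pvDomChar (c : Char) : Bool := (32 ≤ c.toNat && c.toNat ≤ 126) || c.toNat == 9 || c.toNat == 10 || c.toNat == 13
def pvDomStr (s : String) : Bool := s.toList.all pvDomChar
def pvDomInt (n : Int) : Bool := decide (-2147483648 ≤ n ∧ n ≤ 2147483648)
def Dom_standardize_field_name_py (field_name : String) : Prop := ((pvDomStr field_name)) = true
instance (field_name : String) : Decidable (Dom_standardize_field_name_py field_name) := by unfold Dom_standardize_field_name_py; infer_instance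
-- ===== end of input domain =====

-- B replaces A's multi-pass pipeline (replace/filter/while-collapse/strip) by one stateful scan; objective: simpler.

-- ===== PORT A =====

-- str.replace with a 1-character pattern and replacement = per-character substitution (exact)
def pvRepl1 (old new : Char) : List Char → List Char
  | [] => []
  | c :: r => (if c = old then new else c) :: pvRepl1 old new r

-- c.isalnum() or c == '_'
def pvKeep (c : Char) : Bool := PySem.Chars.isalnum c || c == '_'

-- '__' in s (exact: scan for an adjacent pair of underscores)
def pvContainsDD : List Char → Bool
  | [] => false
  | c :: r => (c == '_' && r.head? == some '_') || pvContainsDD r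

-- s.replace('__', '_') (exact: left-to-right, non-overlapping)
def pvReplaceDD : List Char → List Char
  | '_' :: '_' :: r => '_' :: pvReplaceDD r
  | c :: r => c :: pvReplaceDD r
  | [] => []

theorem pvReplaceDD_length_le (l : List Char) : (pvReplaceDD l).length ≤ l.length := by
  induction l using pvReplaceDD.induct <;> simp [pvReplaceDD] <;> omega

theorem pvReplaceDD_cons (c : Char) (r : List Char)
    (h1 : ∀ (r' : List Char), c = '_' → r = '_' :: r' → False) :
    pvReplaceDD (c :: r) = c :: pvReplaceDD r := by
  cases r with
  | nil => cases hcu : c == '_' <;> simp_all [pvReplaceDD]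

  | cons d r' =>
      by_cases hcu : c = '_'
      · by_cases hdu : d = '_'
        · exact absurd (h1 r' hcu (by rw [hdu])) (by simp)
        · subst hcu
          conv_lhs => rw [pvReplaceDD.eq_def]
          simp
      · conv_lhs => rw [pvReplaceDD.eq_def]
        cases r' <;> simp

theorem pvReplaceDD_length_lt (l : List Char) (h : pvContainsDD l = true) :
    (pvReplaceDD l).length < l.length := by
  induction l using pvReplaceDD.induct with
  | case1 r ih =>
      have := pvReplaceDD_length_le r
      simp [pvReplaceDD]; omega
  | case2 c r h1 ih =>
      have hr : pvContainsDD r = true := by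
        simp [pvContainsDD] at h
        rcases h with ⟨hc, hh⟩ | h
        · cases r with
          | nil => simp at hh
          | cons d r' =>
              simp at hh
              subst hh
              exact absurd (h1 r' hc rfl) (by simp)
        · exact h
      have := ih hr
      rw [pvReplaceDD_cons c r h1]
      simp
      omega
  | case3 => simp [pvContainsDD] at h

-- while '__' in s: s = s.replace('__', '_')  (exact port of the fixpoint loop)
def pvWhileDD (l : List Char) : List Char :=
  if pvContainsDD l then pvWhileDD (pvReplaceDD l) else l
termination_by l.length
decreasing_by exact pvReplaceDD_length_lt l (by assumption)

-- s.strip('_') (exact: drop '_' from both ends)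
def pvStripU (l : List Char) : List Char :=
  (((l.dropWhile (· == '_')).reverse.dropWhile (· == '_'))).reverse

def standardize_field_name_py (field_name : String) : String :=
  if field_name = "" then "unknown_field"
  else
    let s1 := pvRepl1 '-' '_' (pvRepl1 ' ' '_' (PySem.Chars.lower field_name.toList))
    let s2 := s1.filter pvKeep
    let s3 := pvStripU (pvWhileDD s2)
    if s3 = [] then "unknown_field" else String.ofList s3

-- ===== PORT B =====

-- one loop step; acc holds the emitted characters in reverse (out[-1] = acc.head)
def pvStep (acc : List Char) (c : Char) : List Char :=
  if c == ' ' || c == '-' || c == '_' then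
    match acc with
    | [] => []
    | p :: _ => if p == '_' then acc else '_' :: acc
  else if PySem.Chars.isalnum c then c :: acc else acc

def standardize_field_name_py_alt (field_name : String) : String :=
  if field_name = "" then "unknown_field"
  else
    let out := (PySem.Chars.lower field_name.toList).foldl pvStep []
    let r := (out.dropWhile (· == '_')).reverse   -- ''.join(out).rstrip('_')
    if r = [] then "unknown_field" else String.ofList r

-- ===== PRECONDITION & SPEC =====
def Spec_standardize_field_name_py (field_name : String) (out : String) : Prop := out = standardize_field_name_py_alt field_name
instance (field_name : String) (out : String) : Decidable (Spec_standardize_field_name_py field_name out) := by unfold Spec_standardize_field_name_py; infer_instance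

-- ===== CLAIM (what is proved, stated in full; the proofs are below) =====
def Claim_equal_standardize_field_name_py : Prop := ∀ (field_name : String), Dom_standardize_field_name_py field_name → Spec_standardize_field_name_py field_name (standardize_field_name_py field_name)

-- ===== LEMMAS AND PROOFS =====

-- stepping two underscores in a row is the same as stepping one
theorem pvStep_underscore_idem (acc : List Char) :
    pvStep (pvStep acc '_') '_' = pvStep acc '_' := by
  cases acc with
  | nil => rfl
  | cons p t =>
      by_cases hp : p = '_' <;> simp [pvStep, hp]

-- L1: scanning the raw (lowered) string = scanning A's mapped-and-filtered string
theorem pvFoldl_map_filter (l : List Char) : ∀ acc : List Char,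
    List.foldl pvStep acc ((pvRepl1 '-' '_' (pvRepl1 ' ' '_' l)).filter pvKeep) =
      List.foldl pvStep acc l := by
  induction l with
  | nil => intro acc; rfl
  | cons c r ih =>
      intro acc
      by_cases hsp : c = ' '
      · subst hsp; simpa [pvRepl1, pvKeep, pvStep] using ih _
      · by_cases hda : c = '-'
        · subst hda; simpa [pvRepl1, pvKeep, pvStep] using ih _
        · by_cases hun : c = '_'
          · subst hun; simpa [pvRepl1, pvKeep, pvStep] using ih _
          · by_cases hal : PySem.Chars.isalnum c = true
            · have h1 : c ≠ ' ' := hsp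
              simp [pvRepl1, hsp, hda, pvKeep, hal, pvStep, hun]
              exact ih _
            · simp [pvRepl1, hsp, hda, pvKeep, hal, hun,
                    pvStep, Bool.or_eq_true]
              exact ih _

-- L2: one '__' -> '_' rewrite does not change the scan
theorem pvFoldl_replaceDD (l : List Char) : ∀ acc : List Char,
    List.foldl pvStep acc (pvReplaceDD l) = List.foldl pvStep acc l := by
  induction l using pvReplaceDD.induct with
  | case1 r ih =>
      intro acc
      simp only [pvReplaceDD, List.foldl]
      rw [ih]
      simp [pvStep_underscore_idem]
  | case2 c r h1 ih =>
      intro acc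
      rw [pvReplaceDD_cons c r h1]
      simp only [List.foldl]
      exact ih _
  | case3 => intro acc; rfl

-- L3: the whole while-loop does not change the scan
theorem pvFoldl_whileDD (l : List Char) :
    List.foldl pvStep [] (pvWhileDD l) = List.foldl pvStep [] l := by
  induction l using pvWhileDD.induct with
  | case1 l h ih =>
      rw [pvWhileDD, if_pos h, ih]
      exact pvFoldl_replaceDD l []
  | case2 l h => rw [pvWhileDD, if_neg h]

-- L4: the while-loop result has no adjacent underscores
theorem pvWhileDD_noDD (l : List Char) : pvContainsDD (pvWhileDD l) = false := by
  induction l using pvWhileDD.induct with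
  | case1 l h ih => rw [pvWhileDD, if_pos h]; exact ih
  | case2 l h => rw [pvWhileDD, if_neg h]; simp at h; exact h

-- membership is only ever shrunk by the rewrites
theorem pvReplaceDD_subset (l : List Char) (c : Char) (h : c ∈ pvReplaceDD l) : c ∈ l := by
  induction l using pvReplaceDD.induct with
  | case1 r ih =>
      simp only [pvReplaceDD, List.mem_cons] at h
      rcases h with h | h
      · simp [h]
      · simp [ih h]
  | case2 d r h1 ih =>
      rw [pvReplaceDD_cons d r h1] at h
      rcases List.mem_cons.mp h with h | h
      · simp [h]
      · simp [ih h]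
  | case3 => simp [pvReplaceDD] at h

theorem pvWhileDD_subset (l : List Char) (c : Char) (h : c ∈ pvWhileDD l) : c ∈ l := by
  induction l using pvWhileDD.induct with
  | case1 l hc ih =>
      rw [pvWhileDD, if_pos hc] at h
      exact pvReplaceDD_subset l c (ih h)
  | case2 l hc => rwa [pvWhileDD, if_neg hc] at h

theorem pvKeep_ne_trio (c : Char) (h : PySem.Chars.isalnum c = true) :
    c ≠ ' ' ∧ c ≠ '-' ∧ c ≠ '_' := by
  refine ⟨?_, ?_, ?_⟩ <;> rintro rfl <;> simp [PySem.Chars.isalnum, PySem.Chars.isalpha,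
    PySem.Chars.isdigit, PySem.Chars.islower, PySem.Chars.isupper] at h

-- L5c: once something non-trivial has been emitted, the scan copies a clean list verbatim
theorem pvFoldl_copy (n : List Char) : ∀ (a : Char) (acc : List Char),
    pvContainsDD n = false → (∀ c ∈ n, pvKeep c = true) →
    (a = '_' → n.head? ≠ some '_') →
    List.foldl pvStep (a :: acc) n = n.reverse ++ a :: acc := by
  induction n with
  | nil => intro a acc _ _ _; rfl
  | cons c r ih =>
      intro a acc hdd hk hcond
      by_cases hcu : c = '_'
      · subst hcu
        have ha : a ≠ '_' := fun h => hcond h (by simp)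
        have hdd' : pvContainsDD r = false ∧ r.head? ≠ some '_' := by
          simp [pvContainsDD] at hdd
          exact ⟨hdd.2, by simpa using hdd.1⟩
        have : pvStep (a :: acc) '_' = '_' :: a :: acc := by
          simp [pvStep, ha]
        simp only [List.foldl, this]
        rw [ih '_' (a :: acc) hdd'.1 (fun c hc => hk c (by simp [hc])) (fun _ => hdd'.2)]
        simp
      · have hal : PySem.Chars.isalnum c = true := by
          have := hk c (by simp)
          simpa [pvKeep, hcu] using this
        obtain ⟨h1, h2, h3⟩ := pvKeep_ne_trio c hal
        have hdd' : pvContainsDD r = false := by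
          simp [pvContainsDD] at hdd; exact hdd.2
        have : pvStep (a :: acc) c = c :: a :: acc := by
          simp [pvStep, h1, h2, h3, hal]
        simp only [List.foldl, this]
        rw [ih c (a :: acc) hdd' (fun d hd => hk d (by simp [hd])) (fun h => absurd h hcu)]
        simp
      
-- L5b: on a clean list the scan = reverse of the left-stripped list
theorem pvFoldl_clean (n : List Char)
    (hdd : pvContainsDD n = false) (hk : ∀ c ∈ n, pvKeep c = true) :
    List.foldl pvStep [] n = (n.dropWhile (· == '_')).reverse := by
  cases n with
  | nil => rfl
  | cons c r =>
      by_cases hcu : c = '_'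
      · subst hcu
        have hdd' : pvContainsDD r = false ∧ r.head? ≠ some '_' := by
          simp [pvContainsDD] at hdd
          exact ⟨hdd.2, by simpa using hdd.1⟩
        have hstep : pvStep [] '_' = [] := rfl
        simp only [List.foldl, hstep, List.dropWhile]
        cases r with
        | nil => rfl
        | cons d r' =>
            have hd : d ≠ '_' := by
              intro h; exact hdd'.2 (by simp [h])
            have hal : PySem.Chars.isalnum d = true := by
              have := hk d (by simp)
              simpa [pvKeep, hd] using this
            obtain ⟨h1, h2, h3⟩ := pvKeep_ne_trio d hal
            have hstep2 : pvStep [] d = [d] := by simp [pvStep, h1, h2, h3, hal]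
            have hddr : pvContainsDD r' = false := by
              simp [pvContainsDD] at hdd; exact hdd.2.2
            simp only [List.foldl, hstep2]
            rw [pvFoldl_copy r' d [] hddr (fun e he => hk e (by simp [he]))
                (fun h => absurd h hd)]
            simp [hd]
      · have hal : PySem.Chars.isalnum c = true := by
          have := hk c (by simp)
          simpa [pvKeep, hcu] using this
        obtain ⟨h1, h2, h3⟩ := pvKeep_ne_trio c hal
        have hstep : pvStep [] c = [c] := by simp [pvStep, h1, h2, h3, hal]
        have hdd' : pvContainsDD r = false := by
          simp [pvContainsDD] at hdd; exact hdd.2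
        simp only [List.foldl, hstep]
        rw [pvFoldl_copy r c [] hdd' (fun d hd => hk d (by simp [hd]))
            (fun h => absurd h hcu)]
        simp [hcu]

-- the two result lists coincide
theorem pvLists_eq (l : List Char) :
    pvStripU (pvWhileDD ((pvRepl1 '-' '_' (pvRepl1 ' ' '_' l)).filter pvKeep)) =
      ((List.foldl pvStep [] l).dropWhile (· == '_')).reverse := by
  set m := (pvRepl1 '-' '_' (pvRepl1 ' ' '_' l)).filter pvKeep with hm
  have hk : ∀ c ∈ pvWhileDD m, pvKeep c = true := by
    intro c hc
    have := pvWhileDD_subset m c hc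
    rw [hm] at this
    exact (List.mem_filter.mp this).2
  have h1 : List.foldl pvStep [] l = List.foldl pvStep [] m := (pvFoldl_map_filter l []).symm
  have h2 : List.foldl pvStep [] m = List.foldl pvStep [] (pvWhileDD m) :=
    (pvFoldl_whileDD m).symm
  rw [h1, h2, pvFoldl_clean (pvWhileDD m) (pvWhileDD_noDD m) hk]
  simp [pvStripU]

-- ===== VERDICT (by name: the statement is the Claim_ definition above) =====
theorem standardize_field_name_py_spec : Claim_equal_standardize_field_name_py := by
  intro fn _
  unfold Spec_standardize_field_name_py standardize_field_name_py standardize_field_name_py_alt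
  by_cases h : fn = ""
  · simp [h]
  · simp only [h, ite_false]
    rw [pvLists_eq (PySem.Chars.lower fn.toList)]
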